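-- pv_equiv track=rewrite | github.com/youssefsharief/CodilityAlgorithmsPractice | src/dynamic/number_solitaire.py | solution
-- ===== SOURCE A (Python) =====
-- def solution(A):
--     # The first six items are used for padding only, so that we can have
--     # a unified for loop, no matter how many squares are there in input.
--     # The first item is never accessed.
--     max_so_far = [A[0]] * (len(A) + 6)
--     max_so_far
--     l = len(max_so_far)
--     l
--     for index in range(1, len(A)):
--         # Because we have a fixed length of window as 6, the time
--         # complexity of max(max_so_far[index : index + 6]) is O(1).
--         u = max_so_far[index + 6]
--         u
--         max_so_far[index + 6] = max(max_so_far[index : index + 6]) +  A[index]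
--         u = max_so_far[index + 6]
--         u
--     return max_so_far[-1]
-- ===== SOURCE B (Python) =====
-- def solution(A):
--     # Monotonic sliding-window-max deque of (index, dp-value) pairs:
--     # instead of re-scanning the 6-wide window, maintain the candidate maxima
--     # incrementally; no dp array at all, only the deque (at most 7 pairs).
--     best = A[0]
--     dq = [(0, A[0])]  # dp-values strictly decreasing along the deque
--     for i in range(1, len(A)):
--         while dq[0][0] < i - 6:   # expire indices that left the window
--             dq.pop(0)
--         best = A[i] + dq[0][1]    # front of deque = max dp over the window
--         while dq and dq[-1][1] <= best:
--             dq.pop()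
--         dq.append((i, best))
--     return best
-- ===== Notes on version B (the rewrite author's own statement) =====
-- stated objective: alternative
-- what changed: replaces A's padded n+6 offset array with repeated 6-element max slice-scans by a monotonic sliding-window-max deque of (index, dp-value) pairs: the window maximum is read at the front and maintained incrementally (expire out-of-window indices at the front, dominated values at the back), so no fresh slice + max call per step and no dp array at all (O(1) extra memory)
import Mathlib
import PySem

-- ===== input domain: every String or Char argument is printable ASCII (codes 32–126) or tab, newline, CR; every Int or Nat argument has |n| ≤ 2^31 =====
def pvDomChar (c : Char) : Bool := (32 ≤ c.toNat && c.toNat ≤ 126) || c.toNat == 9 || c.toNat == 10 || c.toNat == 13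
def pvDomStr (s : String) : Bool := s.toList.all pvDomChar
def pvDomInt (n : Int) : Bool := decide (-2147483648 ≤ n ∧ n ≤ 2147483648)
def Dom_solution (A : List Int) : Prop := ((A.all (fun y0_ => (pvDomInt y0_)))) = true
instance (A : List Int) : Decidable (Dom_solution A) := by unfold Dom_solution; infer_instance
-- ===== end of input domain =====

-- B replaces A's padded offset array with repeated 6-element max slice-scans by a monotonic sliding-window-max deque of (index, dp-value) pairs (alternative data structure, same O(n) cost; return-value equivalence).


-- ===== PORT A =====
-- literal transliteration of Source A: padded array of length n+6, in-place update, window read by slicing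
def solution (A : List Int) : Int :=
  let maxSoFar := List.replicate (A.length + 6) (PySem.List.pyGetD A 0 0)
  let ms := (PySem.List.pyRange 1 (A.length : Int) 1).foldl
    (fun ms index =>
      PySem.List.pySetD ms (index + 6)
        ((PySem.List.max? (PySem.List.slice ms (some index) (some (index + 6))) (fun y => y)).getD 0
          + PySem.List.pyGetD A index 0)) maxSoFar
  PySem.List.pyGetD ms (-1) 0

-- ===== PORT B =====
-- 'while dq[0][0] < i - 6: dq.pop(0)' — drop expired indices from the front
def popFrontB (i : Int) : List (Int × Int) → List (Int × Int)
  | [] => []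
  | p :: t => if p.1 < i - 6 then popFrontB i t else p :: t

-- 'while dq and dq[-1][1] <= best: dq.pop()' — popping from the back while the
-- last value is ≤ best is exactly dropWhile on the reversed list
def popBackB (best : Int) (q : List (Int × Int)) : List (Int × Int) :=
  (q.reverse.dropWhile (fun p => decide (p.2 ≤ best))).reverse

-- literal transliteration of Source B: state (best, deque of (index, dp-value) pairs)
def solution_alt (A : List Int) : Int :=
  let st := (PySem.List.pyRange 1 (A.length : Int) 1).foldl
    (fun (st : Int × List (Int × Int)) i =>
      let dq := popFrontB i st.2
      let best := PySem.List.pyGetD A i 0 + (PySem.List.pyGetD dq 0 (0, 0)).2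
      let dq' := popBackB best dq
      (best, dq' ++ [(i, best)]))
    (PySem.List.pyGetD A 0 0, [(0, PySem.List.pyGetD A 0 0)])
  st.1

-- ===== PRECONDITION & SPEC =====
-- Pre_ excludes only the empty list, on which both A and B raise IndexError reading the first element.
def Pre_solution (A : List Int) : Prop := A ≠ []
instance (A : List Int) : Decidable (Pre_solution A) := by unfold Pre_solution; infer_instance
def pvWitness_solution : List Int := ([1, -2, 3])

def Spec_solution (A : List Int) (out : Int) : Prop := out = solution_alt A
instance (A : List Int) (out : Int) : Decidable (Spec_solution A out) := by unfold Spec_solution; infer_instance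

-- ===== CLAIM (what is proved, stated in full; the proofs are below) =====
def Claim_equal_solution : Prop := ∀ (A : List Int), Dom_solution A → Pre_solution A → Spec_solution A (solution A)

-- ===== LEMMAS AND PROOFS =====

def maxv (l : List Int) : Int := (PySem.List.max? l (fun y => y)).getD 0

lemma maxv_cons (x : Int) (t : List Int) : maxv (x :: t) = t.foldl max x := by
  simp [maxv, PySem.List.max?_id_cons]

lemma foldl_max_replicate (a : Int) (m : Nat) : (List.replicate m a).foldl max a = a := by
  induction m with
  | zero => rfl
  | succ m ih => simpa [List.replicate_succ] using ih

lemma maxv_rep_prefix (a : Int) (m : Nat) (rest : List Int) :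
    maxv (List.replicate m a ++ a :: rest) = maxv (a :: rest) := by
  cases m with
  | zero => simp
  | succ m =>
    rw [List.replicate_succ, List.cons_append, maxv_cons, List.foldl_append,
      foldl_max_replicate, maxv_cons, List.foldl_cons, max_self]

lemma drop_take_window (a : Int) (dps : List Int) (i m : Nat) (hlen : dps.length = i) (h1 : 1 ≤ i) :
    ((List.replicate 6 a ++ dps ++ List.replicate m a).drop i).take 6
      = List.replicate (6 - i) a ++ dps.drop (i - 6) := by
  by_cases h : i ≤ 6
  · have e : List.replicate 6 a = List.replicate i a ++ List.replicate (6-i) a := by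
      rw [← List.replicate_add]; congr 1; omega
    calc ((List.replicate 6 a ++ dps ++ List.replicate m a).drop i).take 6
        = ((List.replicate i a ++ (List.replicate (6-i) a ++ (dps ++ List.replicate m a))).drop i).take 6 := by
          rw [e, List.append_assoc, List.append_assoc]
      _ = (List.replicate (6-i) a ++ (dps ++ List.replicate m a)).take 6 := by
          rw [List.drop_left' (by simp)]
      _ = ((List.replicate (6-i) a ++ dps) ++ List.replicate m a).take 6 := by
          rw [List.append_assoc]
      _ = List.replicate (6-i) a ++ dps := List.take_left' (by simp; omega)
      _ = List.replicate (6 - i) a ++ dps.drop (i - 6) := by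
          rw [show i - 6 = 0 by omega, List.drop_zero]
  · calc ((List.replicate 6 a ++ dps ++ List.replicate m a).drop i).take 6
        = (((List.replicate 6 a ++ (dps ++ List.replicate m a)).drop 6).drop (i-6)).take 6 := by
          rw [List.drop_drop, List.append_assoc]; congr 2; omega
      _ = ((dps ++ List.replicate m a).drop (i-6)).take 6 := by rw [List.drop_left' (by simp)]
      _ = (dps.drop (i-6) ++ List.replicate m a).take 6 := by
          rw [List.drop_append_of_le_length (by omega)]
      _ = dps.drop (i-6) := List.take_left' (by simp [hlen]; omega)
    simp [show 6 - i = 0 by omega]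

def fA (A : List Int) (ms : List Int) (index : Int) : List Int :=
  PySem.List.pySetD ms (index + 6)
    ((PySem.List.max? (PySem.List.slice ms (some index) (some (index + 6))) (fun y => y)).getD 0
      + PySem.List.pyGetD A index 0)

def fB (A : List Int) (st : Int × List (Int × Int)) (i : Int) : Int × List (Int × Int) :=
  let dq := popFrontB i st.2
  let best := PySem.List.pyGetD A i 0 + (PySem.List.pyGetD dq 0 (0, 0)).2
  let dq' := popBackB best dq
  (best, dq' ++ [(i, best)])

lemma maxv_window (a : Int) (rest : List Int) (i : Nat) (h1 : 1 ≤ i) :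
    maxv (List.replicate (6 - i) a ++ (a :: rest).drop (i - 6)) = maxv ((a :: rest).drop (i - 6)) := by
  by_cases h : 6 ≤ i
  · rw [show 6 - i = 0 by omega]; simp
  · rw [show i - 6 = 0 by omega, List.drop_zero, maxv_rep_prefix]

lemma fA_step (A : List Int) (a : Int) (dps rest : List Int) (i : Nat)
    (hlen : dps.length = i) (hd : dps = a :: rest) (hi : i < A.length) (h1 : 1 ≤ i) :
    fA A (List.replicate 6 a ++ dps ++ List.replicate (A.length - i) a) (i : Int)
      = List.replicate 6 a ++ (dps ++ [A[i] + maxv (dps.drop (i - 6))]) ++ List.replicate (A.length - (i + 1)) a := by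
  have e2 : (((i : Nat) : Int) + 6).toNat = i + 6 := by omega
  unfold fA
  rw [PySem.List.slice_toNat _ (by positivity) (by positivity)]
  rw [PySem.List.pySetD_of_nonneg _ _ (by positivity)]
  rw [e2]
  simp only [Int.toNat_natCast]
  rw [show i + 6 - i = 6 by omega]
  rw [drop_take_window a dps i (A.length - i) hlen h1]
  rw [show ((PySem.List.max? (List.replicate (6 - i) a ++ dps.drop (i - 6)) (fun y => y)).getD 0)
        = maxv (List.replicate (6 - i) a ++ dps.drop (i - 6)) from rfl]
  rw [hd, maxv_window a rest i h1, ← hd]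
  rw [PySem.List.pyGetD_natCast, List.getD_eq_getElem _ _ hi]
  have hrep : List.replicate (A.length - i) a = a :: List.replicate (A.length - (i + 1)) a := by
    rw [show A.length - i = (A.length - (i + 1)) + 1 by omega, List.replicate_succ]
  rw [hrep]
  have hset : (List.replicate 6 a ++ dps ++ (a :: List.replicate (A.length - (i + 1)) a)).set (i + 6)
      (maxv (dps.drop (i - 6)) + A[i])
      = List.replicate 6 a ++ dps ++ ((a :: List.replicate (A.length - (i + 1)) a).set 0
          (maxv (dps.drop (i - 6)) + A[i])) := by
    rw [show i + 6 = (List.replicate 6 a ++ dps).length by simp [hlen]]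
    simp
  rw [hset]
  simp [List.append_assoc, add_comm]

-- max-fold helper lemmas
lemma foldl_max_init_le : ∀ (t : List Int) (a : Int), a ≤ t.foldl max a := by
  intro t
  induction t with
  | nil => intro a; simp
  | cons b t ih => intro a; exact le_trans (le_max_left a b) (ih (max a b))

lemma le_foldl_max_of_mem : ∀ (t : List Int) (a y : Int), y ∈ t → y ≤ t.foldl max a := by
  intro t
  induction t with
  | nil => intro a y h; simp at h
  | cons b t ih =>
    intro a y h
    rcases List.mem_cons.mp h with h | h
    · subst h; exact le_trans (le_max_right a y) (foldl_max_init_le t _)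
    · exact ih _ y h

lemma foldl_max_le (x : Int) : ∀ (t : List Int) (a : Int), a ≤ x → (∀ y ∈ t, y ≤ x) → t.foldl max a ≤ x := by
  intro t
  induction t with
  | nil => intro a ha _; simpa using ha
  | cons b t ih =>
    intro a ha hb
    exact ih (max a b) (max_le ha (hb b (by simp))) (fun y hy => hb y (by simp [hy]))

lemma maxv_eq_of {l : List Int} {x : Int} (hx : x ∈ l) (hub : ∀ y ∈ l, y ≤ x) : maxv l = x := by
  cases l with
  | nil => simp at hx
  | cons a t =>
    rw [maxv_cons]
    apply le_antisymm
    · exact foldl_max_le x t a (hub a (by simp)) (fun y hy => hub y (by simp [hy]))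
    · rcases List.mem_cons.mp hx with h | h
      · subst h; exact foldl_max_init_le t x
      · exact le_foldl_max_of_mem t a x h

-- popFront lemmas
lemma popFront_sublist (i : Int) : ∀ Q : List (Int × Int), List.Sublist (popFrontB i Q) Q := by
  intro Q
  induction Q with
  | nil => simp [popFrontB]
  | cons p t ih =>
    unfold popFrontB
    split
    · exact ih.trans (List.sublist_cons_self p t)
    · exact List.Sublist.refl _

lemma popFront_mem {i : Int} {Q : List (Int × Int)} {p : Int × Int} (h : p ∈ popFrontB i Q) : p ∈ Q :=
  (popFront_sublist i Q).mem h

lemma popFront_keep {i : Int} : ∀ {Q : List (Int × Int)} {p : Int × Int},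
    p ∈ Q → ¬ p.1 < i - 6 → p ∈ popFrontB i Q := by
  intro Q
  induction Q with
  | nil => intro p h; simp at h
  | cons q t ih =>
    intro p hp hge
    unfold popFrontB
    split
    · rename_i hq
      rcases List.mem_cons.mp hp with h | h
      · subst h; exact absurd hq hge
      · exact ih h hge
    · exact hp

lemma popFront_getLast {i : Int} : ∀ {Q : List (Int × Int)} {z : Int × Int},
    Q.getLast? = some z → ¬ z.1 < i - 6 → (popFrontB i Q).getLast? = some z := by
  intro Q
  induction Q with
  | nil => intro z h; simp at h
  | cons q t ih =>
    intro z hz hge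
    unfold popFrontB
    split
    · rename_i hq
      cases t with
      | nil =>
        simp at hz; subst hz; exact absurd hq hge
      | cons r s =>
        rw [List.getLast?_cons_cons] at hz
        exact ih hz hge
    · exact hz

lemma popFront_head {i : Int} : ∀ {Q : List (Int × Int)} {p : Int × Int} {t : List (Int × Int)},
    popFrontB i Q = p :: t → ¬ p.1 < i - 6 := by
  intro Q
  induction Q with
  | nil => intro p t h; simp [popFrontB] at h
  | cons q s ih =>
    intro p t h
    unfold popFrontB at h
    split at h
    · exact ih h
    · rename_i hq; cases h; exact hq

-- popBack lemmas
lemma dropWhile_head_false {α} (f : α → Bool) : ∀ (l : List α) (x : α) (t : List α),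
    l.dropWhile f = x :: t → f x = false := by
  intro l
  induction l with
  | nil => intro x t h; simp [List.dropWhile] at h
  | cons a l ih =>
    intro x t h
    rw [List.dropWhile_cons] at h
    split at h
    · exact ih x t h
    · rename_i ha; cases h; simpa using ha

lemma popBack_sublist (best : Int) (Q : List (Int × Int)) : List.Sublist (popBackB best Q) Q := by
  have h := (List.dropWhile_sublist (l := Q.reverse) (p := fun p => decide (p.2 ≤ best))).reverse
  rwa [List.reverse_reverse] at h

lemma popBack_gt {best : Int} {Q : List (Int × Int)}
    (hpw : List.Pairwise (fun p q : Int × Int => q.2 < p.2) Q) :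
    ∀ p ∈ popBackB best Q, best < p.2 := by
  intro p hp
  unfold popBackB at hp
  rw [List.mem_reverse] at hp
  have hrev : List.Pairwise (fun p q : Int × Int => p.2 < q.2) Q.reverse := by
    rw [List.pairwise_reverse]; exact hpw
  have hpw2 : List.Pairwise (fun p q : Int × Int => p.2 < q.2)
      (Q.reverse.dropWhile (fun p => decide (p.2 ≤ best))) :=
    List.Pairwise.sublist (List.dropWhile_sublist _) hrev
  cases hR : Q.reverse.dropWhile (fun p => decide (p.2 ≤ best)) with
  | nil => rw [hR] at hp; simp at hp
  | cons h0 t0 =>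
    have hh0 : best < h0.2 := by
      have := dropWhile_head_false _ _ _ _ hR
      simpa using this
    rw [hR] at hp hpw2
    rcases List.mem_cons.mp hp with h | h
    · subst h; exact hh0
    · exact lt_trans hh0 ((List.pairwise_cons.mp hpw2).1 p h)

lemma popBack_dropped {best : Int} {Q : List (Int × Int)} {p : Int × Int}
    (hp : p ∈ Q) (hnp : p ∉ popBackB best Q) : p.2 ≤ best := by
  have hsplit := List.takeWhile_append_dropWhile (p := fun p : Int × Int => decide (p.2 ≤ best)) (l := Q.reverse)
  have hp' : p ∈ Q.reverse := List.mem_reverse.mpr hp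
  rw [← hsplit] at hp'
  rcases List.mem_append.mp hp' with h | h
  · have := List.mem_takeWhile_imp h
    simpa using this
  · exact absurd (by unfold popBackB; rw [List.mem_reverse]; exact h) hnp

-- deque invariant
def QInv (dps : List Int) (i : Nat) (Q : List (Int × Int)) : Prop :=
  List.Pairwise (fun p q : Int × Int => p.1 < q.1 ∧ q.2 < p.2) Q ∧
  (∀ p ∈ Q, ∃ j : Nat, p.1 = (j : Int) ∧ j < i ∧ dps.getD j 0 = p.2) ∧
  Q.getLast? = some (((i : Int) - 1, dps.getD (i - 1) 0)) ∧
  (∀ j : Nat, j < i → (i : Int) - 7 ≤ (j : Int) → ∃ p ∈ Q, (j : Int) ≤ p.1 ∧ dps.getD j 0 ≤ p.2)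

lemma head_windowmax (dps : List Int) (i : Nat) (Q f : _) (t : List (Int × Int))
    (h1 : 1 ≤ i) (hlen : dps.length = i) (hinv : QInv dps i Q)
    (hQ' : popFrontB (i : Int) Q = f :: t) :
    f.2 = maxv (dps.drop (i - 6)) := by
  obtain ⟨hpw, hmem, hlast, hcov⟩ := hinv
  have hfQ : f ∈ Q := popFront_mem (by rw [hQ']; exact List.mem_cons_self ..)
  obtain ⟨j0, hj0e, hj0lt, hj0v⟩ := hmem f hfQ
  have hfge : ¬ f.1 < (i : Int) - 6 := popFront_head hQ'
  rw [hj0e] at hfge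
  have hpwQ' : List.Pairwise (fun p q : Int × Int => p.1 < q.1 ∧ q.2 < p.2) (f :: t) := by
    rw [← hQ']; exact List.Pairwise.sublist (popFront_sublist _ _) hpw
  have hj0lt' : j0 < dps.length := by omega
  have hwin_mem : f.2 ∈ dps.drop (i - 6) := by
    have hk : j0 - (i - 6) < (dps.drop (i - 6)).length := by simp [hlen]; omega
    have he : (dps.drop (i - 6))[j0 - (i - 6)] = dps[j0] := by
      rw [List.getElem_drop]; congr 1; omega
    rw [← hj0v, List.getD_eq_getElem _ _ hj0lt', ← he]
    exact List.getElem_mem hk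
  have hub : ∀ y ∈ dps.drop (i - 6), y ≤ f.2 := by
    intro y hy
    obtain ⟨k, hk, hky⟩ := List.getElem_of_mem hy
    have hklen : k < dps.length - (i - 6) := by simpa using hk
    have hjlt : i - 6 + k < i := by omega
    have hyj : y = dps.getD (i - 6 + k) 0 := by
      rw [List.getD_eq_getElem _ _ (by omega), ← hky, List.getElem_drop]
    obtain ⟨p, hpQ, hple, hpv⟩ := hcov (i - 6 + k) hjlt (by omega)
    have hpge : ¬ p.1 < (i : Int) - 6 := by omega
    have hpQ' : p ∈ f :: t := by rw [← hQ']; exact popFront_keep hpQ hpge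
    have hpf : p.2 ≤ f.2 := by
      rcases List.mem_cons.mp hpQ' with h | h
      · rw [h]
      · exact le_of_lt ((List.pairwise_cons.mp hpwQ').1 p h).2
    rw [hyj]; exact le_trans hpv hpf
  exact (maxv_eq_of hwin_mem hub).symm

lemma final_eq' (a : Int) (dps : List Int) (hne : dps ≠ []) :
    PySem.List.pyGetD (List.replicate 6 a ++ dps ++ List.replicate 0 a) (-1) 0
      = dps.getD (dps.length - 1) 0 := by
  have hlen1 : 1 ≤ dps.length := List.length_pos_iff.mpr hne
  simp only [List.replicate_zero, List.append_nil]
  have hne1 : List.replicate 6 a ++ dps ≠ [] := by simp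
  rw [PySem.List.pyGetD_neg_one _ _ hne1, List.getD_eq_getElem _ _ (by omega)]
  apply Option.some_injective
  rw [← List.getLast?_eq_some_getLast, List.getLast?_append_of_ne_nil _ hne,
    List.getLast?_eq_some_getLast hne, List.getLast_eq_getElem]

lemma QInv_step (dps : List Int) (i : Nat) (Q f : _) (t : List (Int × Int)) (c : Int)
    (h1 : 1 ≤ i) (hlen : dps.length = i) (hinv : QInv dps i Q)
    (hQ' : popFrontB (i : Int) Q = f :: t) :
    QInv (dps ++ [c]) (i + 1) (popBackB c (f :: t) ++ [((i : Int), c)]) := by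
  obtain ⟨hpw, hmem, hlast, hcov⟩ := hinv
  have hsubQ' : List.Sublist (f :: t) Q := by rw [← hQ']; exact popFront_sublist _ _
  have hpwQ' : List.Pairwise (fun p q : Int × Int => p.1 < q.1 ∧ q.2 < p.2) (f :: t) :=
    List.Pairwise.sublist hsubQ' hpw
  have hPQ : ∀ p ∈ popBackB c (f :: t), p ∈ Q :=
    fun p hp => hsubQ'.mem ((popBack_sublist c (f :: t)).mem hp)
  have hgetc : (dps ++ [c]).getD i 0 = c := by
    rw [← hlen, List.getD_append_right dps [c] 0 dps.length (le_refl _)]; simp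
  refine ⟨?_, ?_, ?_, ?_⟩
  · rw [List.pairwise_append]
    refine ⟨List.Pairwise.sublist (popBack_sublist c (f :: t)) hpwQ', by simp, ?_⟩
    intro p hp p' hp'
    simp only [List.mem_singleton] at hp'
    subst hp'
    obtain ⟨j, hje, hjlt, _⟩ := hmem p (hPQ p hp)
    refine ⟨by show p.1 < (i : Int); rw [hje]; exact_mod_cast hjlt, ?_⟩
    exact popBack_gt (List.Pairwise.imp (fun h => h.2) hpwQ') p hp
  · intro p hp
    rcases List.mem_append.mp hp with h | h
    · obtain ⟨j, hje, hjlt, hjv⟩ := hmem p (hPQ p h)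
      exact ⟨j, hje, by omega, by rw [List.getD_append dps [c] 0 j (by omega)]; exact hjv⟩
    · simp only [List.mem_singleton] at h
      subst h
      exact ⟨i, rfl, by omega, hgetc⟩
  · rw [List.getLast?_concat]
    have e1 : ((i + 1 : Nat) : Int) - 1 = (i : Int) := by push_cast; ring
    rw [e1, show i + 1 - 1 = i from rfl, hgetc]
  · intro j hj hj7
    by_cases hji : j = i
    · subst hji
      exact ⟨((j : Int), c), by simp, le_refl _, by rw [hgetc]⟩
    · have hjlt : j < i := by omega
      have hj6 : (i : Int) - 6 ≤ (j : Int) := by push_cast at hj7; omega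
      obtain ⟨p, hpQ, hple, hpv⟩ := hcov j hjlt (by omega)
      have hpge : ¬ p.1 < (i : Int) - 6 := by omega
      have hpQ'' : p ∈ f :: t := by rw [← hQ']; exact popFront_keep hpQ hpge
      have hgetd : (dps ++ [c]).getD j 0 = dps.getD j 0 :=
        List.getD_append dps [c] 0 j (by omega)
      by_cases hpP : p ∈ popBackB c (f :: t)
      · exact ⟨p, List.mem_append_left _ hpP, hple, by rw [hgetd]; exact hpv⟩
      · have hpc : p.2 ≤ c := popBack_dropped hpQ'' hpP
        exact ⟨((i : Int), c), by simp, by omega, by rw [hgetd]; exact le_trans hpv hpc⟩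

lemma loop_eq (A : List Int) (a : Int) :
    ∀ (k i : Nat), A.length ≤ i + k → 1 ≤ i → i ≤ A.length →
    ∀ (dps rest : List Int) (Q : List (Int × Int)),
      dps.length = i → dps = a :: rest → QInv dps i Q →
      PySem.List.pyGetD ((PySem.List.pyRange (i : Int) (A.length : Int) 1).foldl (fA A)
          (List.replicate 6 a ++ dps ++ List.replicate (A.length - i) a)) (-1) 0
        = ((PySem.List.pyRange (i : Int) (A.length : Int) 1).foldl (fB A) (dps.getD (i - 1) 0, Q)).1 := by
  intro k
  induction k with
  | zero =>
    intro i hk h1 h2 dps rest Q hlen hd hinv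
    have hin : i = A.length := by omega
    subst hin
    rw [PySem.List.pyRange_one_eq_nil (le_refl _)]
    simp only [List.foldl_nil]
    rw [show A.length - A.length = 0 by omega, final_eq' a dps (by rw [hd]; simp), hlen]
  | succ k ih =>
    intro i hk h1 h2 dps rest Q hlen hd hinv
    by_cases hin : i < A.length
    · rw [PySem.List.pyRange_one_cons (by exact_mod_cast hin)]
      simp only [List.foldl_cons]
      rw [fA_step A a dps rest i hlen hd hin h1]
      have hlq : ¬ (((i : Int) - 1, dps.getD (i - 1) 0) : Int × Int).1 < (i : Int) - 6 := by
        simp only []; omega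
      have hlast' := popFront_getLast (i := (i : Int)) hinv.2.2.1 hlq
      cases hQ' : popFrontB ((i : Nat) : Int) Q with
      | nil => rw [hQ'] at hlast'; simp at hlast'
      | cons f t =>
        have hf2 : f.2 = maxv (dps.drop (i - 6)) := head_windowmax dps i Q f t h1 hlen hinv hQ'
        have hfB : fB A (dps.getD (i - 1) 0, Q) ((i : Nat) : Int)
            = (A[i] + maxv (dps.drop (i - 6)),
               popBackB (A[i] + maxv (dps.drop (i - 6))) (f :: t)
                 ++ [(((i : Nat) : Int), A[i] + maxv (dps.drop (i - 6)))]) := by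
          simp only [fB]
          rw [hQ', PySem.List.pyGetD_zero_cons, PySem.List.pyGetD_natCast,
            List.getD_eq_getElem _ _ hin, hf2]
        rw [hfB]
        have hqinv' := QInv_step dps i Q f t (A[i] + maxv (dps.drop (i - 6))) h1 hlen hinv hQ'
        have e1 : ((i : Nat) : Int) + 1 = (((i + 1 : Nat)) : Int) := by push_cast; ring
        rw [e1]
        have egetd : (dps ++ [A[i] + maxv (dps.drop (i - 6))]).getD ((i + 1) - 1) 0
            = A[i] + maxv (dps.drop (i - 6)) := by
          rw [show (i + 1) - 1 = i from rfl, List.getD_append_right dps _ 0 i (by omega)]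
          simp [hlen]
        have hrec := ih (i + 1) (by omega) (by omega) (by omega)
          (dps ++ [A[i] + maxv (dps.drop (i - 6))]) (rest ++ [A[i] + maxv (dps.drop (i - 6))])
          (popBackB (A[i] + maxv (dps.drop (i - 6))) (f :: t)
            ++ [(((i : Nat) : Int), A[i] + maxv (dps.drop (i - 6)))])
          (by simp [hlen]) (by simp [hd]) hqinv'
        rw [egetd] at hrec
        exact hrec
    · have hin' : i = A.length := by omega
      subst hin'
      rw [PySem.List.pyRange_one_eq_nil (le_refl _)]
      simp only [List.foldl_nil]
      rw [show A.length - A.length = 0 by omega, final_eq' a dps (by rw [hd]; simp), hlen]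

-- ===== VERDICT (by name: the statement is the Claim_ definition above) =====
theorem solution_spec : Claim_equal_solution := by
  intro A _hDom hPre
  unfold Spec_solution
  revert hPre
  show A ≠ [] → _
  intro hPre
  have h1 : 1 ≤ A.length := by cases A with | nil => simp at hPre | cons x t => simp
  set a := PySem.List.pyGetD A 0 0 with ha
  have hinv : QInv [a] 1 [(0, a)] := by
    refine ⟨by simp, ?_, by simp, ?_⟩
    · intro p hp; simp at hp; subst hp; exact ⟨0, by simp⟩
    · intro j hj _; interval_cases j; exact ⟨(0, a), by simp⟩
  have key := loop_eq A a A.length 1 (by omega) (le_refl 1) h1 [a] [] [(0, a)] rfl rfl hinv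
  unfold solution solution_alt
  have einit : List.replicate (A.length + 6) a
      = List.replicate 6 a ++ [a] ++ List.replicate (A.length - 1) a := by
    rw [show A.length + 6 = 6 + (1 + (A.length - 1)) by omega, List.replicate_add,
      List.replicate_add]
    simp
  rw [← ha, einit]
  simpa using key
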